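-- pv_equiv track=rewrite | github.com/RobinTruax/PetalProjections | spp_library.py | splitSignedGaussCode
-- ===== SOURCE A (Python) =====
-- def splitSignedGaussCode(signed_Gauss_code):
--     #Preparing to split up the signed Gauss code into arcs
--     arcs = []
--     current_arc = []
--
--     #Creating a list to scan through that starts with the first negative number
--     trawl = list(range(len(signed_Gauss_code)))
--     for i in range(len(signed_Gauss_code)):
--         if signed_Gauss_code[i] < 0:
--             trawl = trawl[i:] + trawl[:i]
--             break
--
--     #Splitting the signed Gauss code up into arcs
--     current_arc.append(signed_Gauss_code[trawl[0]])
--     for i in trawl[1:]: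
--         current_arc.append(signed_Gauss_code[i])
--         if signed_Gauss_code[i] < 0:
--             arcs.append(current_arc)
--             current_arc = []
--             current_arc.append(signed_Gauss_code[i])
--     current_arc.append(signed_Gauss_code[trawl[0]])
--     arcs.append(current_arc)
--
--     return(arcs)
-- ===== SOURCE B (Python) =====
-- # B: rotate the code itself to its first negative, list the positions of the
-- # remaining negatives once, and slice the rotation into arcs between
-- # consecutive negative positions (instead of A's index-trawl plus
-- # element-by-element accumulator loop).
-- def splitSignedGaussCode(signed_Gauss_code):
--     start = 0
--     for i, v in enumerate(signed_Gauss_code):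
--         if v < 0:
--             start = i
--             break
--     rotated = signed_Gauss_code[start:] + signed_Gauss_code[:start]
--     first = rotated[0]
--     neg = [j for j, v in enumerate(rotated) if v < 0 and j > 0]
--     arcs = []
--     prev = 0
--     for j in neg:
--         arcs.append(rotated[prev:j + 1])
--         prev = j
--     arcs.append(rotated[prev:] + [first])
--     return arcs
-- ===== Notes on version B (the rewrite author's own statement) =====
-- stated objective: alternative
-- what changed: B rotates the code itself to its first negative, collects the positions of the remaining negatives once, and slices the rotation into arcs between consecutive negative positions, instead of A's rotated index-list trawl scanned element by element with an arcs/current_arc accumulator loop.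
import Mathlib
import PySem

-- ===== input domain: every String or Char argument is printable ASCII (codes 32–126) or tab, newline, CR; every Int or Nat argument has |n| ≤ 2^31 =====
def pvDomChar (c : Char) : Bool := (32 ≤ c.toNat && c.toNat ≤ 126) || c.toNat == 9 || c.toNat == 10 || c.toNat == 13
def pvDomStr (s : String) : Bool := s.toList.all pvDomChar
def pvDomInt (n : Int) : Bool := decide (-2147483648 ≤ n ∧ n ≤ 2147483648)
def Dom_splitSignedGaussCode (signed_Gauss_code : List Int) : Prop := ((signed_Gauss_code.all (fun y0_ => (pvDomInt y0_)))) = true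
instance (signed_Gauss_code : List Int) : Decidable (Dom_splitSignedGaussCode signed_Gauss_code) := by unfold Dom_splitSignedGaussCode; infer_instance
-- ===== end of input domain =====

-- B rotates the code itself to its first negative, lists the remaining negative
-- positions once and slices the rotation into arcs between consecutive negatives
-- (objective: alternative decomposition, same cost); A trawls a rotated index
-- list element by element with an arcs/current_arc accumulator loop.

-- ===== PORT A =====
-- for i in range(len(code)): if code[i] < 0: trawl = trawl[i:] + trawl[:i]; break
def pvRotLoop (code : List Int) (trawl : List Int) : List Int → List Int
  | [] => trawl
  | i :: rest =>
    if PySem.List.pyGetD code i 0 < 0 then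
      PySem.List.slice trawl (some i) none ++ PySem.List.slice trawl none (some i)
    else pvRotLoop code trawl rest

-- for i in trawl[1:]: current_arc.append(code[i]); if code[i] < 0: close the arc
def pvArcLoop (code : List Int) : List Int → List (List Int) × List Int → List (List Int) × List Int
  | [], st => st
  | i :: rest, (arcs, cur) =>
    let v := PySem.List.pyGetD code i 0
    if v < 0 then pvArcLoop code rest (arcs ++ [cur ++ [v]], [v])
    else pvArcLoop code rest (arcs, cur ++ [v])

-- current_arc = [code[trawl[0]]]; loop; current_arc.append(code[trawl[0]]); arcs.append(current_arc)
def pvBodyA (code : List Int) (trawl : List Int) : List (List Int) :=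
  match trawl with
  | [] => []   -- Python raises IndexError (trawl[0]) exactly here (empty input); excluded by Pre_
  | t0 :: ts =>
    let first := PySem.List.pyGetD code t0 0
    let st := pvArcLoop code ts ([], [first])
    st.1 ++ [st.2 ++ [first]]

def splitSignedGaussCode (signed_Gauss_code : List Int) : List (List Int) :=
  let n : Int := signed_Gauss_code.length
  pvBodyA signed_Gauss_code
    (pvRotLoop signed_Gauss_code (PySem.List.pyRange 0 n 1) (PySem.List.pyRange 0 n 1))

-- ===== PORT B =====
-- start = index of first negative (0 if none)
def pvFindStart : List Int → Int → Int
  | [], _ => 0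
  | v :: rest, i => if v < 0 then i else pvFindStart rest (i + 1)

-- loop body: arcs.append(rotated[prev:j+1]); prev = j
def pvStep (rotated : List Int) (st : List (List Int) × Int) (j : Int) : List (List Int) × Int :=
  (st.1 ++ [PySem.List.slice rotated (some st.2) (some (j + 1))], j)

def splitSignedGaussCode_alt (signed_Gauss_code : List Int) : List (List Int) :=
  let start := pvFindStart signed_Gauss_code 0
  let rotated := PySem.List.slice signed_Gauss_code (some start) none
                 ++ PySem.List.slice signed_Gauss_code none (some start)
  match rotated with
  | [] => []   -- Python raises IndexError (rotated[0]) exactly here (empty input); excluded by Pre_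
  | r0 :: _ =>
    let neg := ((PySem.List.enumerate rotated).filter (fun p => decide (p.2 < 0 ∧ 0 < p.1))).map (·.1)
    let st := neg.foldl (pvStep rotated) ([], 0)
    st.1 ++ [PySem.List.slice rotated (some st.2) none ++ [r0]]

-- ===== PRECONDITION & SPEC =====
-- Pre_ excludes only the empty list, on which A raises IndexError.
def Pre_splitSignedGaussCode (signed_Gauss_code : List Int) : Prop := signed_Gauss_code ≠ []
instance (signed_Gauss_code : List Int) : Decidable (Pre_splitSignedGaussCode signed_Gauss_code) := by unfold Pre_splitSignedGaussCode; infer_instance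
def pvWitness_splitSignedGaussCode : List Int := [-1, 2, -2, 1]

def Spec_splitSignedGaussCode (signed_Gauss_code : List Int) (out : List (List Int)) : Prop := out = splitSignedGaussCode_alt signed_Gauss_code
instance (signed_Gauss_code : List Int) (out : List (List Int)) : Decidable (Spec_splitSignedGaussCode signed_Gauss_code out) := by unfold Spec_splitSignedGaussCode; infer_instance

-- ===== CLAIM (what is proved, stated in full; the proofs are below) =====
def Claim_equal_splitSignedGaussCode : Prop := ∀ (signed_Gauss_code : List Int), Dom_splitSignedGaussCode signed_Gauss_code → Pre_splitSignedGaussCode signed_Gauss_code → Spec_splitSignedGaussCode signed_Gauss_code (splitSignedGaussCode signed_Gauss_code)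


-- ===== LEMMAS AND PROOFS =====

-- value-level image of A's arc loop (indices replaced by the values they look up)
def pvArcLoopV : List Int → List (List Int) × List Int → List (List Int) × List Int
  | [], st => st
  | v :: rest, st =>
    if v < 0 then pvArcLoopV rest (st.1 ++ [st.2 ++ [v]], [v])
    else pvArcLoopV rest (st.1, st.2 ++ [v])

-- the code rotated to its first negative entry (unchanged if none)
def rotOf (code : List Int) : List Int :=
  match code.findIdx? (fun v => v < 0) with
  | some j => code.drop j ++ code.take j
  | none => code

-- A's body after the trawl, as a function of the looked-up values
def pvBodyV (w : List Int) : List (List Int) :=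
  match w with
  | [] => []
  | r0 :: rs =>
    let st := pvArcLoopV rs ([], [r0])
    st.1 ++ [st.2 ++ [r0]]

-- recursive chopping of the rotated list at each next negative (proof-side normal form)
def pvArcsB (first : Int) (out : List (List Int)) (xs : List Int) : List (List Int) :=
  match h : xs.tail.findIdx? (fun v => v < 0) with
  | some j => pvArcsB first (out ++ [xs.take (j + 2)]) (xs.drop (j + 1))
  | none => out ++ [xs ++ [first]]
termination_by xs.length
decreasing_by
  have hj := List.findIdx?_eq_some_iff_findIdx_eq.mp h
  have : j < xs.tail.length := hj.1
  simp [List.length_tail] at this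
  simp
  omega

-- absolute positions (base-shifted) of the negatives of a list
def negFrom : List Int → Int → List Int
  | [], _ => []
  | v :: rest, b => (if v < 0 then [b] else []) ++ negFrom rest (b + 1)

lemma arcLoop_eq_V (code : List Int) :
    ∀ (is : List Int) (st : List (List Int) × List Int),
      pvArcLoop code is st = pvArcLoopV (is.map (fun i => PySem.List.pyGetD code i 0)) st := by
  intro is
  induction is with
  | nil => intro st; rfl
  | cons i rest ih =>
    intro ⟨arcs, cur⟩
    simp only [pvArcLoop, pvArcLoopV, List.map_cons]
    split_ifs <;> exact ih _

lemma rotLoop_eq_find (code : List Int) :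
    ∀ (is trawl : List Int),
      pvRotLoop code trawl is =
        match is.find? (fun i => decide (PySem.List.pyGetD code i 0 < 0)) with
        | some i => PySem.List.slice trawl (some i) none ++ PySem.List.slice trawl none (some i)
        | none => trawl := by
  intro is
  induction is with
  | nil => intro trawl; rfl
  | cons i rest ih =>
    intro trawl
    rw [List.find?_cons]
    by_cases h : PySem.List.pyGetD code i 0 < 0
    · simp [pvRotLoop, h]
    · simp only [pvRotLoop, h, decide_false]
      exact ih trawl

lemma find?_range_getD (p : Int → Bool) :
    ∀ (xs : List Int), (List.range xs.length).find? (fun k => p (xs.getD k 0)) = xs.findIdx? p := by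
  intro xs
  induction xs with
  | nil => rfl
  | cons x t ih =>
    rw [List.length_cons, List.range_succ_eq_map, List.find?_cons, List.findIdx?_cons]
    cases hp : p x with
    | true => simp [hp]
    | false =>
      simp only [List.getD_cons_zero, hp]
      rw [List.find?_map]
      simp only [Function.comp_def, Nat.succ_eq_add_one, List.getD_cons_succ]
      rw [ih]
      rfl

lemma find?_pyRange_neg (xs : List Int) :
    (PySem.List.pyRange 0 (xs.length : Int) 1).find? (fun i => decide (PySem.List.pyGetD xs i 0 < 0))
      = (xs.findIdx? (fun v => v < 0)).map (fun j : Nat => (j : Int)) := by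
  rw [PySem.List.pyRange_zero_nat, List.find?_map]
  rw [← find?_range_getD (fun v => decide (v < 0)) xs]
  congr 2
  funext k
  simp [PySem.List.pyGetD_natCast]

lemma map_lookup_pyRange (xs : List Int) :
    (PySem.List.pyRange 0 (xs.length : Int) 1).map (fun i => PySem.List.pyGetD xs i 0) = xs := by
  have h := PySem.List.map_pyGetD_pyRange xs 0 (a := 0) le_rfl
  simpa [PySem.List.len_eq] using h

lemma map_lookup_pyRange_from (xs : List Int) (j : Nat) :
    (PySem.List.pyRange (j : Int) (xs.length : Int) 1).map (fun i => PySem.List.pyGetD xs i 0) = xs.drop j := by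
  have h := PySem.List.map_pyGetD_pyRange xs 0 (a := (j : Int)) (by positivity)
  simpa [PySem.List.len_eq] using h

lemma map_lookup_pyRange_to (xs : List Int) (j : Nat) (hj : j ≤ xs.length) :
    (PySem.List.pyRange 0 (j : Int) 1).map (fun i => PySem.List.pyGetD xs i 0) = xs.take j := by
  have hsplit := PySem.List.pyRange_one_append 0 (j : Int) (xs.length : Int) (by positivity) (by exact_mod_cast hj)
  have hall := map_lookup_pyRange xs
  rw [hsplit, List.map_append, map_lookup_pyRange_from] at hall
  have htd : xs.take j ++ xs.drop j = xs := List.take_append_drop j xs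
  exact List.append_cancel_right (hall.trans htd.symm)

lemma tail_append_of_ne_nil {l l' : List Int} (h : l ≠ []) : (l ++ l').tail = l.tail ++ l' := by
  cases l with
  | nil => exact absurd rfl h
  | cons a t => simp

lemma bodyA_eq (code : List Int) (trawl : List Int) :
    pvBodyA code trawl = pvBodyV (trawl.map (fun i => PySem.List.pyGetD code i 0)) := by
  cases trawl with
  | nil => rfl
  | cons t0 ts => simp [pvBodyA, pvBodyV, arcLoop_eq_V]

lemma A_norm (code : List Int) : splitSignedGaussCode code = pvBodyV (rotOf code) := by
  show pvBodyA code
      (pvRotLoop code (PySem.List.pyRange 0 (code.length : Int) 1)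
        (PySem.List.pyRange 0 (code.length : Int) 1)) = pvBodyV (rotOf code)
  rw [rotLoop_eq_find, find?_pyRange_neg, bodyA_eq]
  cases hfi : code.findIdx? (fun v => v < 0) with
  | none =>
    simp only [hfi, Option.map_none]
    rw [map_lookup_pyRange]
    simp [rotOf, hfi]
  | some j =>
    have hj : j < code.length := (List.findIdx?_eq_some_iff_findIdx_eq.mp hfi).1
    simp only [hfi, Option.map_some]
    rw [PySem.List.slice_from_natCast, PySem.List.slice_to_natCast]
    have hsplit := PySem.List.pyRange_one_append 0 (j : Int) (code.length : Int) (by positivity)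
      (by exact_mod_cast hj.le)
    have hlenP : (PySem.List.pyRange 0 (j : Int) 1).length = j := by
      simp [PySem.List.length_pyRange_one]
    have hdrop : (PySem.List.pyRange 0 (code.length : Int) 1).drop j
        = PySem.List.pyRange (j : Int) (code.length : Int) 1 := by
      rw [hsplit, List.drop_left' hlenP]
    have htake : (PySem.List.pyRange 0 (code.length : Int) 1).take j
        = PySem.List.pyRange 0 (j : Int) 1 := by
      rw [hsplit, List.take_left' hlenP]
    rw [hdrop, htake, List.map_append, map_lookup_pyRange_from, map_lookup_pyRange_to code j hj.le]
    simp only [rotOf, hfi]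

lemma pvArcsB_none (f : Int) (out : List (List Int)) (xs : List Int)
    (h : xs.tail.findIdx? (fun v => v < 0) = none) :
    pvArcsB f out xs = out ++ [xs ++ [f]] := by
  rw [pvArcsB]
  split
  · rename_i j hj; rw [h] at hj; cases hj
  · rfl

lemma pvArcsB_some (f : Int) (out : List (List Int)) (xs : List Int) (j : Nat)
    (h : xs.tail.findIdx? (fun v => v < 0) = some j) :
    pvArcsB f out xs = pvArcsB f (out ++ [xs.take (j + 2)]) (xs.drop (j + 1)) := by
  rw [pvArcsB]
  split
  · rename_i j' hj; rw [h] at hj; cases hj; rfl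
  · rename_i hj; rw [h] at hj; cases hj

lemma findStart_eq (code : List Int) :
    ∀ i : Int, pvFindStart code i =
      match code.findIdx? (fun v => v < 0) with
      | some j => i + (j : Int)
      | none => 0 := by
  induction code with
  | nil => intro i; rfl
  | cons x t ih =>
    intro i
    rw [List.findIdx?_cons]
    by_cases h : x < 0
    · simp [pvFindStart, h]
    · simp only [pvFindStart, h, decide_false, if_false]
      rw [ih (i+1)]
      cases hf : t.findIdx? (fun v => v < 0) <;> simp <;> ring

lemma enum_filter_negFrom :
    ∀ (ys : List Int) (sidx : Int), 1 ≤ sidx →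
      (((PySem.List.enumerate ys sidx).filter (fun p => decide (p.2 < 0 ∧ 0 < p.1))).map (·.1))
        = negFrom ys sidx := by
  intro ys
  induction ys with
  | nil => intro sidx _; rfl
  | cons y t ih =>
    intro sidx hs
    rw [PySem.List.enumerate_cons, List.filter_cons]
    by_cases hy : y < 0
    · have hcond : decide ((sidx, y).2 < 0 ∧ 0 < (sidx, y).1) = true := by
        simp only [decide_eq_true_eq]
        exact ⟨hy, by omega⟩
      rw [hcond]
      simp only [if_true, List.map_cons, negFrom, if_pos hy]
      rw [ih (sidx + 1) (by omega)]
      rfl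
    · have hcond : decide ((sidx, y).2 < 0 ∧ 0 < (sidx, y).1) = false := by
        simp only [decide_eq_false_iff_not]
        intro hcon
        exact hy hcon.1
      rw [hcond]
      simp only [Bool.false_eq_true, if_false, negFrom, if_neg hy]
      rw [ih (sidx + 1) (by omega)]
      rfl

lemma negFrom_chunk :
    ∀ (zs : List Int) (b : Int),
      negFrom zs b =
        match zs.findIdx? (fun v => v < 0) with
        | some k => (b + (k : Int)) :: negFrom (zs.drop (k + 1)) (b + (k : Int) + 1)
        | none => [] := by
  intro zs
  induction zs with
  | nil => intro b; rfl
  | cons z t ih =>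
    intro b
    rw [List.findIdx?_cons]
    by_cases hz : z < 0
    · simp only [negFrom, if_pos hz, hz, decide_true, if_true, List.cons_append,
        List.nil_append]
      simp

    · simp only [negFrom, if_neg hz, hz, decide_false, Bool.false_eq_true, if_false,
        List.nil_append]
      simp
      rw [ih (b + 1)]
      cases hf : t.findIdx? (fun v => v < 0) with
      | none => rfl
      | some k =>
        simp only [Option.map_some, List.drop_succ_cons]
        congr 1
        · push_cast; ring
        · congr 1
          push_cast; ring

lemma fold_eq_chop (w : List Int) (r0 : Int) :
    ∀ (n : Nat) (ys : List Int) (c : Nat) (out : List (List Int)),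
      ys.length = n → ys = w.drop c →
      (let st := (negFrom ys.tail ((c : Int) + 1)).foldl (pvStep w) (out, (c : Int));
        st.1 ++ [PySem.List.slice w (some st.2) none ++ [r0]]) = pvArcsB r0 out ys := by
  intro n
  induction n using Nat.strong_induction_on with
  | h n ih =>
    intro ys c out hn hys
    rw [negFrom_chunk]
    cases hf : ys.tail.findIdx? (fun v => v < 0) with
    | none =>
      rw [pvArcsB_none r0 out ys hf]
      simp only [List.foldl_nil]
      rw [PySem.List.slice_from_natCast, ← hys]
    | some k =>
      have hk : k < ys.tail.length := by
        have := List.findIdx?_eq_some_iff_findIdx_eq.mp hf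
        exact this.1
      rw [pvArcsB_some r0 out ys k hf]
      simp only [List.foldl_cons, pvStep]
      -- first arc: w[c : c+k+2] = ys.take (k+2)
      have hslice : PySem.List.slice w (some (c : Int)) (some ((c : Int) + 1 + (k : Int) + 1))
          = ys.take (k + 2) := by
        have hcast : (c : Int) + 1 + (k : Int) + 1 = (c : Int) + ((k + 2 : Nat) : Int) := by
          push_cast; ring
        rw [hcast, PySem.List.slice_natCast_add, ← hys]
      rw [hslice]
      -- recurse
      have hlen' : (ys.drop (k + 1)).length < n := by
        simp only [List.length_drop]
        simp only [List.length_tail] at hk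
        omega
      have hys' : ys.drop (k + 1) = w.drop (c + k + 1) := by
        rw [hys, List.drop_drop]
        congr 1
      have htail' : (ys.drop (k + 1)).tail = ys.tail.drop (k + 1) := by
        rw [List.tail_drop, ← List.drop_one, List.drop_drop, Nat.add_comm 1 (k + 1)]
      have hrec := ih _ hlen' (ys.drop (k + 1)) (c + k + 1) (out ++ [ys.take (k + 2)]) rfl hys'
      simp only [htail'] at hrec
      have hb1 : ((c + k + 1 : Nat) : Int) + 1 = (c : Int) + (k : Int) + 1 + 1 := by push_cast; ring
      have hb2 : ((c + k + 1 : Nat) : Int) = (c : Int) + 1 + (k : Int) := by push_cast; ring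
      rw [hb1, hb2] at hrec
      have hb3 : (c : Int) + 1 + (k : Int) + 1 = (c : Int) + (k : Int) + 1 + 1 := by ring
      rw [hb3]
      exact hrec

lemma B_norm (code : List Int) :
    splitSignedGaussCode_alt code =
      match rotOf code with
      | [] => []
      | r0 :: _ => pvArcsB r0 [] (rotOf code) := by
  have hbody : ∀ w : List Int, w = rotOf code →
      (match w with
       | [] => ([] : List (List Int))
       | r0 :: _ =>
         let neg := ((PySem.List.enumerate w).filter (fun p => decide (p.2 < 0 ∧ 0 < p.1))).map (·.1)
         let st := neg.foldl (pvStep w) ([], 0)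
         st.1 ++ [PySem.List.slice w (some st.2) none ++ [r0]])
      = match rotOf code with
        | [] => []
        | r0 :: _ => pvArcsB r0 [] (rotOf code) := by
    intro w hw
    cases hc : w with
    | nil => rw [← hw, hc]
    | cons r0 rs =>
      rw [← hw, hc]
      simp only []
      have hneg : ((PySem.List.enumerate (r0 :: rs)).filter
          (fun p => decide (p.2 < 0 ∧ 0 < p.1))).map (·.1) = negFrom rs 1 := by
        rw [PySem.List.enumerate_cons, List.filter_cons]
        have hcond : decide (((0:Int), r0).2 < 0 ∧ 0 < ((0:Int), r0).1) = false := by simp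
        rw [hcond]
        simpa using enum_filter_negFrom rs 1 le_rfl
      have hfold := fold_eq_chop (r0 :: rs) r0 (r0 :: rs).length (r0 :: rs) 0 [] rfl (by simp)
      simp only [Nat.cast_zero, zero_add, List.tail_cons] at hfold
      rw [hneg]
      exact hfold
  unfold splitSignedGaussCode_alt
  rw [findStart_eq]
  cases hfi : code.findIdx? (fun v => v < 0) with
  | none =>
    have hrot : rotOf code = code := by simp [rotOf, hfi]
    simp only [hfi]
    have h0 : PySem.List.slice code (some (0 : Int)) none
        ++ PySem.List.slice code none (some (0 : Int)) = code := by
      have := PySem.List.slice_from_natCast code 0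
      have := PySem.List.slice_to_natCast code 0
      simp_all
    rw [h0]
    exact hbody code hrot.symm
  | some j =>
    have hrot : rotOf code = code.drop j ++ code.take j := by simp [rotOf, hfi]
    simp only [hfi, zero_add]
    rw [PySem.List.slice_from_natCast, PySem.List.slice_to_natCast]
    exact hbody _ hrot.symm

lemma loopV_arcsB (first : Int) :
    ∀ (t cur : List Int) (arcs : List (List Int)), cur ≠ [] → (∀ v ∈ cur.tail, ¬ v < 0) →
      (pvArcLoopV t (arcs, cur)).1 ++ [(pvArcLoopV t (arcs, cur)).2 ++ [first]]
        = pvArcsB first arcs (cur ++ t) := by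
  intro t
  induction t with
  | nil =>
    intro cur arcs hne hnn
    rw [List.append_nil, pvArcsB_none first arcs cur (List.findIdx?_eq_none_iff.mpr (by
      intro x hx; simpa using hnn x hx))]
    rfl
  | cons v rest ih =>
    intro cur arcs hne hnn
    by_cases hv : v < 0
    · simp only [pvArcLoopV, if_pos hv]
      rw [ih [v] (arcs ++ [cur ++ [v]]) (by simp) (by simp)]
      have hfi : (cur ++ v :: rest).tail.findIdx? (fun v => v < 0) = some (cur.length - 1) := by
        rw [tail_append_of_ne_nil hne, List.findIdx?_append]
        rw [List.findIdx?_eq_none_iff.mpr (by intro x hx; simpa using hnn x hx)]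
        simp [List.findIdx?_cons, hv, List.length_tail]
      rw [pvArcsB_some first arcs _ _ hfi]
      have hlen : 1 ≤ cur.length := List.length_pos_of_ne_nil hne
      have h1 : cur.length - 1 + 2 = cur.length + 1 := by omega
      have h2 : cur.length - 1 + 1 = cur.length := by omega
      rw [h1, h2]
      have htake : (cur ++ v :: rest).take (cur.length + 1) = cur ++ [v] := by
        rw [List.take_append]
        simp
      have hdrop : (cur ++ v :: rest).drop cur.length = v :: rest := List.drop_left
      rw [htake, hdrop]
      simp
    · simp only [pvArcLoopV, if_neg hv]
      rw [ih (cur ++ [v]) arcs (by simp) (by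
        rw [tail_append_of_ne_nil hne]
        intro x hx
        rcases List.mem_append.mp hx with h | h
        · exact hnn x h
        · rw [List.mem_singleton.mp h]; exact hv)]
      simp

-- ===== VERDICT (by name: the statement is the Claim_ definition above) =====
theorem splitSignedGaussCode_spec : Claim_equal_splitSignedGaussCode := by
  intro code _ _
  unfold Spec_splitSignedGaussCode
  rw [A_norm, B_norm]
  cases hrot : rotOf code with
  | nil => rfl
  | cons r0 rs =>
    have h := loopV_arcsB r0 rs [r0] [] (by simp) (by simp)
    simpa [pvBodyV] using h
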